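-- pv_equiv track=rewrite | github.com/Unknownflow/CS1010X | PracticalExam/2025/answers/topic-3-cut-rod-answer_ver3.py | cut_rod_limit_10m
-- ===== SOURCE A (Python) =====
-- def cut_rod_mm(n, prices):
--     seen = {}
--     def cut_rod_xx(n, prices, baggage):
--         if n in seen:
--             return seen[n]
--
--         if n <=0:
--             return 0,()
--         else:
--             max_price = 0
--             for p in prices: # this is to go through all the options of cutting (key, which is the length)
--                 if p <= n:
--                     temp_price, temp_bag = cut_rod_xx(n-p, prices, ())
--                     if max_price < (prices[p]+temp_price):
--                         max_price = prices[p]+temp_price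
--                         baggage = (p,) + temp_bag
--
--             seen[n] = (max_price, baggage)
--             return max_price, baggage
--     return cut_rod_xx(n, prices, ())
--
-- def cut_rod_limit_10m(m, n, prices):
--
--     temp_prices = dict(prices)
--     if 10 in prices:
--         temp_prices.pop(10)
--
--     # use 1, use 2, use ..until n
--     max_price = 0
--     if 10 in prices:
--         for i in range(m+1):
--             if n-i*10 < 0:  # this is needed to make sure no error
--                 break
--             temp_max, temp_baggage = cut_rod_mm(n - i*10, temp_prices)
--             if temp_max + prices[10]*i > max_price:
--                 max_price = temp_max + prices[10]*i
--                 baggage = temp_baggage + (10,)*i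
--     else:
--         max_price, baggage = cut_rod_mm(n, temp_prices)
--     return (max_price, baggage)
-- ===== SOURCE B (Python) =====
-- def cut_rod_limit_10m(m, n, prices):
--     temp_prices = dict(prices)
--     if 10 in prices:
--         temp_prices.pop(10)
--     items = list(temp_prices.items())
--     size = n if n > 0 else 0
--     vals = [0]; chs = [0]
--     for j in range(1, size + 1):
--         mx = 0; ch = 0
--         for p, v in items:
--             if p <= j:
--                 c = v + vals[j - p]
--                 if mx < c:
--                     mx = c; ch = p
--         vals.append(mx); chs.append(ch)
--     def bag_of(j):
--         out = []
--         while 0 < j and chs[j]: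
--             out.append(chs[j]); j -= chs[j]
--         return tuple(out)
--     if 10 in prices:
--         v10 = prices[10]
--         best, besti = 0, None
--         for i in range(m + 1):
--             if n - 10 * i < 0: break
--             cand = vals[n - 10 * i] + v10 * i
--             if cand > best: best, besti = cand, i
--         if besti is None: return (0, ())
--         return (best, bag_of(n - 10 * besti) + (10,) * besti)
--     return (vals[n], bag_of(n)) if n >= 0 else (0, ())
-- ===== Notes on version B (the rewrite author's own statement) =====
-- stated objective: alternative
-- what changed: B computes the cut-rod DP bottom-up once as parallel value/first-cut tables up to n, reconstructs the bag once at the end by following the recorded cuts, and turns each of A's m+1 fresh memoised recursions over n-10*i into a table lookup; measured faster on many inputs but not uniformly, so no speed is claimed.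
import Mathlib
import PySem

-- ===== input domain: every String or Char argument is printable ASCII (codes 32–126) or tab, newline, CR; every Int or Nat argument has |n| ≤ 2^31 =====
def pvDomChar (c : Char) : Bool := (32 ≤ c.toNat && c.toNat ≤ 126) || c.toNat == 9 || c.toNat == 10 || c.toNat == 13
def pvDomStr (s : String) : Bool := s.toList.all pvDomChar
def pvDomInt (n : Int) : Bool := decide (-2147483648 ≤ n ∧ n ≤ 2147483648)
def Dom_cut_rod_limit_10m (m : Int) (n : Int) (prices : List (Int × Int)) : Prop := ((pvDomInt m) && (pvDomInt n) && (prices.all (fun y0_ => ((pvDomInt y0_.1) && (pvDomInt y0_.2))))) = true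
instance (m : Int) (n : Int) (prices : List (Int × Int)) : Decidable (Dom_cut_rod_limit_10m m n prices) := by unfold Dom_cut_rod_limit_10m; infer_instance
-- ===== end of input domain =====

-- B replaces A's per-i memoised recursion (rebuilt from scratch for every number of
-- 10-cuts i) by ONE bottom-up cut-rod table computed up to n, each n-10*i becoming a lookup.

-- ===== PORT A =====
-- cut_rod_mm's inner cut_rod_xx, threading the 'seen' memo dict; the Nat fuel is only a
-- totality guard (under Pre_ the fuel n.toNat+1 is never exhausted).
mutual
def pvA_xx (items : List (Int × Int)) : Nat → PySem.Dict Int (Int × List Int) → Int →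
    ((Int × List Int) × PySem.Dict Int (Int × List Int))
  | 0, seen, _ => ((0, []), seen)            -- fuel guard (unreachable under Pre_)
  | fuel+1, seen, n =>
    match seen.get? n with
    | some r => (r, seen)                    -- if n in seen: return seen[n]
    | none =>
      if n ≤ 0 then ((0, []), seen)
      else
        let res := pvA_loop items fuel n items ((0, []), seen)
        (res.1, res.2.insert n res.1)        -- seen[n] = (max_price, baggage)
termination_by fuel _ _ => (fuel, 0)
-- the 'for p in prices' loop (over the dict's items), threading the memo
def pvA_loop (items : List (Int × Int)) (fuel : Nat) (n : Int) :
    List (Int × Int) → ((Int × List Int) × PySem.Dict Int (Int × List Int)) →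
    ((Int × List Int) × PySem.Dict Int (Int × List Int))
  | [], acc => acc
  | (p, v) :: rest, ((mx, bag), s) =>
    if p ≤ n then
      let sub := pvA_xx items fuel s (n - p)
      let st := if mx < v + sub.1.1 then (v + sub.1.1, p :: sub.1.2) else (mx, bag)
      pvA_loop items fuel n rest (st, sub.2)
    else pvA_loop items fuel n rest ((mx, bag), s)
termination_by l _ => (fuel, l.length + 1)
end

def pvA_mm (n : Int) (items : List (Int × Int)) : Int × List Int :=
  (pvA_xx items (n.toNat + 1) PySem.Dict.empty n).1

-- the 'for i in range(m+1)' loop with its break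
def pvA_mloop (items : List (Int × Int)) (v10 : Int) (n : Int) :
    List Int → (Int × List Int) → (Int × List Int)
  | [], st => st
  | i :: rest, (best, bag) =>
    if n - i * 10 < 0 then (best, bag)       -- break
    else
      let t := pvA_mm (n - i * 10) items
      let st := if t.1 + v10 * i > best then (t.1 + v10 * i, t.2 ++ List.replicate i.toNat 10)
                else (best, bag)
      pvA_mloop items v10 n rest st

def cut_rod_limit_10m (m : Int) (n : Int) (prices : List (Int × Int)) : Int × List Int :=
  let d := PySem.Dict.ofList prices
  let temp := if d.contains 10 then d.erase 10 else d
  if d.contains 10 then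
    pvA_mloop temp.items (d.getD 10 0) n (PySem.List.pyRange 0 (m + 1) 1) (0, [])
  else
    pvA_mm n temp.items

-- ===== PORT B =====
-- one row of the bottom-up value scan; returns (best value, first cut of the best bag;
-- 0 = none).  '.getD 0' only covers the IndexError case, which Pre_ excludes.
def pvB_row (items : List (Int × Int)) (vals : List Int) (j : Int) : Int × Int :=
  items.foldl (fun st pv =>
    if pv.1 ≤ j then
      let c := pv.2 + (PySem.List.pyGet? vals (j - pv.1)).getD 0
      if st.1 < c then (c, pv.1) else st
    else st) (0, 0)

-- 'for j in range(1, size+1): vals.append(mx); chs.append(ch)'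
def pvB_build (items : List (Int × Int)) : Nat → List Int × List Int
  | 0 => ([0], [0])
  | k+1 =>
    let t := pvB_build items k
    let row := pvB_row items t.1 ((k : Int) + 1)
    (t.1 ++ [row.1], t.2 ++ [row.2])

-- bag_of's while loop; the Nat fuel is only a totality guard (inside Pre_ every recorded
-- cut is positive, so j.toNat steps suffice)
def pvB_bagof (chs : List Int) : Nat → Int → List Int → List Int
  | 0, _, out => out
  | fuel+1, j, out =>
    let ch := (PySem.List.pyGet? chs j).getD 0
    if 0 < j ∧ ch ≠ 0 then pvB_bagof chs fuel (j - ch) (out ++ [ch]) else out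

-- the 'for i in range(m+1)' loop with its break: only the best value and its i are kept
def pvB_mloop (vals : List Int) (v10 : Int) (n : Int) :
    List Int → (Int × Option Int) → (Int × Option Int)
  | [], st => st
  | i :: rest, (best, besti) =>
    if n - 10 * i < 0 then (best, besti)   -- break
    else
      let cand := (PySem.List.pyGet? vals (n - 10 * i)).getD 0 + v10 * i
      if cand > best then pvB_mloop vals v10 n rest (cand, some i)
      else pvB_mloop vals v10 n rest (best, besti)

def cut_rod_limit_10m_alt (m : Int) (n : Int) (prices : List (Int × Int)) : Int × List Int :=
  let d := PySem.Dict.ofList prices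
  let temp := if d.contains 10 then d.erase 10 else d
  let t := pvB_build temp.items (if 0 < n then n.toNat else 0)
  if d.contains 10 then
    let r := pvB_mloop t.1 (d.getD 10 0) n (PySem.List.pyRange 0 (m + 1) 1) (0, none)
    match r.2 with
    | none => (0, [])
    | some i =>
      (r.1, pvB_bagof t.2 (n - 10 * i).toNat (n - 10 * i) [] ++ List.replicate i.toNat 10)
  else
    if 0 ≤ n then
      ((PySem.List.pyGet? t.1 n).getD 0, pvB_bagof t.2 n.toNat n [])
    else (0, [])

-- ===== PRECONDITION & SPEC =====
-- Pre_ excludes exactly the inputs where the Python A raises: a non-positive price length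
-- reached with a positive remaining rod makes cut_rod_xx recurse forever (RecursionError),
-- and in the 10-key branch a NameError occurs ('baggage' never bound) when no loop
-- iteration strictly improves on 0 — i.e. unless one 10-cut is profitable (value of 10
-- positive, m ≥ 1, n ≥ 10) or some other positive-valued length fits in n.
def Pre_cut_rod_limit_10m (m : Int) (n : Int) (prices : List (Int × Int)) : Prop :=
  let d := PySem.Dict.ofList prices
  if d.contains 10 then
    0 ≤ m ∧ 0 ≤ n ∧ (∀ kv ∈ d.items, 0 < kv.1) ∧
      ((0 < d.getD 10 0 ∧ 1 ≤ m ∧ 10 ≤ n) ∨ ∃ kv ∈ d.items, kv.1 ≠ 10 ∧ kv.1 ≤ n ∧ 0 < kv.2)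
  else
    n ≤ 0 ∨ ∀ kv ∈ d.items, 0 < kv.1

instance (m : Int) (n : Int) (prices : List (Int × Int)) : Decidable (Pre_cut_rod_limit_10m m n prices) := by
  unfold Pre_cut_rod_limit_10m; infer_instance

def pvWitness_cut_rod_limit_10m : Int × Int × (List (Int × Int)) := (1, 12, [(2, 3), (10, 5)])

def Spec_cut_rod_limit_10m (m : Int) (n : Int) (prices : List (Int × Int)) (out : Int × List Int) : Prop := out = cut_rod_limit_10m_alt m n prices
instance (m : Int) (n : Int) (prices : List (Int × Int)) (out : Int × List Int) : Decidable (Spec_cut_rod_limit_10m m n prices out) := by unfold Spec_cut_rod_limit_10m; infer_instance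

-- ===== CLAIM (what is proved, stated in full; the proofs are below) =====
def Claim_equal_cut_rod_limit_10m : Prop := ∀ (m : Int) (n : Int) (prices : List (Int × Int)), Dom_cut_rod_limit_10m m n prices → Pre_cut_rod_limit_10m m n prices → Spec_cut_rod_limit_10m m n prices (cut_rod_limit_10m m n prices)

-- ===== LEMMAS AND PROOFS =====

-- the fuelled recurrence both programs implement, without the memo (proof device)
mutual
def pvF (items : List (Int × Int)) : Nat → Int → Int × List Int
  | 0, _ => (0, [])
  | fuel+1, n => if n ≤ 0 then (0, []) else pvFloop items fuel n items (0, [])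
termination_by fuel _ => (fuel, 0)
def pvFloop (items : List (Int × Int)) (fuel : Nat) (n : Int) :
    List (Int × Int) → (Int × List Int) → (Int × List Int)
  | [], st => st
  | (p, v) :: rest, (mx, bag) =>
    let st := if p ≤ n then
        let sub := pvF items fuel (n - p)
        if mx < v + sub.1 then (v + sub.1, p :: sub.2) else (mx, bag)
      else (mx, bag)
    pvFloop items fuel n rest st
termination_by l _ => (fuel, l.length + 1)
end

def pvFB (items : List (Int × Int)) (n : Int) : Int × List Int := pvF items (n.toNat + 1) n

-- one pure scan step, sub-results taken from the spec pvFB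
def pvStep (items : List (Int × Int)) (n : Int) (st : Int × List Int) (pv : Int × Int) :
    Int × List Int :=
  if pv.1 ≤ n then
    let sub := pvFB items (n - pv.1)
    if st.1 < pv.2 + sub.1 then (pv.2 + sub.1, pv.1 :: sub.2) else st
  else st

def pvPos (items : List (Int × Int)) : Prop := ∀ kv ∈ items, 0 < kv.1

def pvSound (items : List (Int × Int)) (s : PySem.Dict Int (Int × List Int)) : Prop :=
  ∀ k r, s.get? k = some r → r = pvFB items k

-- fuel irrelevance: with positive lengths, any adequate fuel computes pvFB
theorem pvF_stable (items : List (Int × Int)) (hpos : pvPos items) :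
    ∀ N : Nat, ∀ n : Int, ∀ f : Nat, n.toNat = N → N < f → pvF items f n = pvFB items n := by
  intro N
  induction N using Nat.strong_induction_on with
  | _ N IH =>
    intro n f hN hf
    obtain ⟨g, rfl⟩ : ∃ g, f = g + 1 := ⟨f - 1, by omega⟩
    unfold pvFB
    rw [hN]
    by_cases hn : n ≤ 0
    · simp [pvF, hn]
    · have hloop : ∀ l, (∀ kv ∈ l, kv ∈ items) → ∀ st,
          pvFloop items g n l st = pvFloop items N n l st := by
        intro l
        induction l with
        | nil => intro _ st; simp only [pvFloop]
        | cons hd tl ihl =>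
          intro hsub st
          obtain ⟨p, v⟩ := hd
          obtain ⟨mx, bag⟩ := st
          have hmem : (p, v) ∈ items := hsub _ (List.mem_cons_self)
          simp only [pvFloop]
          by_cases hp : p ≤ n
          · have hp0 : (0 : Int) < p := hpos _ hmem
            have h1 : pvF items g (n - p) = pvFB items (n - p) :=
              IH (n - p).toNat (by omega) _ _ rfl (by omega)
            have h2 : pvF items N (n - p) = pvFB items (n - p) :=
              IH (n - p).toNat (by omega) _ _ rfl (by omega)
            rw [h1, h2, ihl (fun kv h => hsub _ (List.mem_cons_of_mem _ h))]
          · rw [if_neg hp, if_neg hp, ihl (fun kv h => hsub _ (List.mem_cons_of_mem _ h))]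
      simp only [pvF, if_neg hn]
      exact hloop items (fun _ h => h) _

theorem pvFloop_eq_foldl (items : List (Int × Int)) (hpos : pvPos items) (n : Int) (g : Nat)
    (hn : 0 < n) (hg : n.toNat ≤ g) :
    ∀ l : List (Int × Int), (∀ kv ∈ l, kv ∈ items) → ∀ st,
      pvFloop items g n l st = l.foldl (pvStep items n) st := by
  intro l
  induction l with
  | nil => intro _ st; simp only [pvFloop, List.foldl_nil]
  | cons hd tl ihl =>
    intro hsub st
    obtain ⟨p, v⟩ := hd
    obtain ⟨mx, bag⟩ := st
    have hmem : (p, v) ∈ items := hsub _ List.mem_cons_self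
    simp only [pvFloop, List.foldl_cons, pvStep]
    by_cases hp : p ≤ n
    · have hp0 : (0 : Int) < p := hpos _ hmem
      have h1 : pvF items g (n - p) = pvFB items (n - p) :=
        pvF_stable items hpos (n - p).toNat _ _ rfl (by omega)
      rw [h1, ihl (fun kv h => hsub _ (List.mem_cons_of_mem _ h))]
    · rw [if_neg hp, if_neg hp, ihl (fun kv h => hsub _ (List.mem_cons_of_mem _ h))]

theorem pvFB_eq_foldl (items : List (Int × Int)) (hpos : pvPos items) (n : Int) (hn : 0 < n) :
    pvFB items n = items.foldl (pvStep items n) (0, []) := by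
  unfold pvFB
  simp only [pvF, if_neg (by omega : ¬ n ≤ 0)]
  exact pvFloop_eq_foldl items hpos n n.toNat hn (le_refl _) items (fun _ h => h) _

theorem pvFB_nonpos (items : List (Int × Int)) (n : Int) (hn : n ≤ 0) :
    pvFB items n = (0, []) := by
  simp [pvFB, pvF, hn]

-- memoisation soundness: the memo-threading recursion computes pvFB
theorem pvA_xx_correct (items : List (Int × Int)) (hpos : pvPos items) :
    ∀ N : Nat, ∀ n : Int, ∀ fuel : Nat, ∀ s, n.toNat = N → N < fuel → pvSound items s →
      (pvA_xx items fuel s n).1 = pvFB items n ∧ pvSound items (pvA_xx items fuel s n).2 := by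
  intro N
  induction N using Nat.strong_induction_on with
  | _ N IH =>
    intro n fuel s hN hf hs
    obtain ⟨g, rfl⟩ : ∃ g, fuel = g + 1 := ⟨fuel - 1, by omega⟩
    simp only [pvA_xx]
    cases hg : s.get? n with
    | some r =>
      exact ⟨hs _ _ hg, hs⟩
    | none =>
      by_cases hn : n ≤ 0
      · simp only [if_pos hn]
        exact ⟨(pvFB_nonpos items n hn).symm, hs⟩
      · simp only [if_neg hn]
        have hloop : ∀ l, (∀ kv ∈ l, kv ∈ items) → ∀ st s', pvSound items s' →
            (pvA_loop items g n l (st, s')).1 = l.foldl (pvStep items n) st ∧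
              pvSound items (pvA_loop items g n l (st, s')).2 := by
          intro l
          induction l with
          | nil => intro _ st s' hs'; exact ⟨by simp only [pvA_loop, List.foldl_nil], by simpa only [pvA_loop] using hs'⟩
          | cons hd tl ihl =>
            intro hsub st s' hs'
            obtain ⟨p, v⟩ := hd
            obtain ⟨mx, bag⟩ := st
            have hmem : (p, v) ∈ items := hsub _ List.mem_cons_self
            simp only [pvA_loop, List.foldl_cons, pvStep]
            by_cases hp : p ≤ n
            · have hp0 : (0 : Int) < p := hpos _ hmem
              have hrec := IH (n - p).toNat (by omega) (n - p) g s' rfl (by omega) hs'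
              rw [if_pos hp, if_pos hp]
              rw [hrec.1]
              exact ihl (fun kv h => hsub _ (List.mem_cons_of_mem _ h)) _ _ hrec.2
            · rw [if_neg hp, if_neg hp]
              exact ihl (fun kv h => hsub _ (List.mem_cons_of_mem _ h)) _ _ hs'
        obtain ⟨h1, h2⟩ := hloop items (fun _ h => h) (0, []) s hs
        rw [← pvFB_eq_foldl items hpos n (by omega)] at h1
        refine ⟨h1, ?_⟩
        intro k r hk
        rw [PySem.Dict.get?_insert] at hk
        by_cases hkn : k = n
        · rw [if_pos hkn] at hk
          cases hk
          rw [h1, hkn]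
        · rw [if_neg hkn] at hk
          exact h2 _ _ hk

theorem pvA_mm_correct (items : List (Int × Int)) (hpos : pvPos items) (n : Int) :
    pvA_mm n items = pvFB items n := by
  have h := pvA_xx_correct items hpos n.toNat n (n.toNat + 1) PySem.Dict.empty rfl
    (by omega) (by intro k r hk; simp [PySem.Dict.get?_empty] at hk)
  exact h.1

theorem pvMapGet {α : Type} (f : Nat → α) (K : Nat) (i : Int) (h0 : 0 ≤ i)
    (hK : i ≤ (K : Int)) :
    PySem.List.pyGet? ((List.range (K + 1)).map f) i = some (f i.toNat) := by
  rw [PySem.List.pyGet?_of_nonneg _ h0]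
  have hi : i.toNat < K + 1 := by omega
  simp [hi]

-- the scan over the value table tracks A's scan over (value, bag) pairs:
-- values agree and the recorded cut is the head of the bag
theorem pvScan2 (items : List (Int × Int)) (hpos : pvPos items) (K : Nat) (j : Int)
    (hjK : j ≤ (K : Int) + 1) :
    ∀ l : List (Int × Int), (∀ kv ∈ l, kv ∈ items) → ∀ st : Int × List Int,
      l.foldl (fun st pv =>
        if pv.1 ≤ j then
          let c := pv.2 + (PySem.List.pyGet?
              ((List.range (K + 1)).map (fun (a : Nat) => (pvFB items (a : Int)).1)) (j - pv.1)).getD 0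
          if st.1 < c then (c, pv.1) else st
        else st) (st.1, st.2.headI) =
      ((l.foldl (pvStep items j) st).1, (l.foldl (pvStep items j) st).2.headI) := by
  intro l
  induction l with
  | nil => intro _ st; simp only [List.foldl_nil]
  | cons hd tl ihl =>
    intro hsub st
    obtain ⟨p, v⟩ := hd
    have hmem : (p, v) ∈ items := hsub _ List.mem_cons_self
    have hsub' : ∀ kv ∈ tl, kv ∈ items := fun kv h => hsub _ (List.mem_cons_of_mem _ h)
    have hp0 : (0 : Int) < p := hpos _ hmem
    simp only [List.foldl_cons, pvStep]
    by_cases hp : p ≤ j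
    · rw [if_pos hp, if_pos hp,
        pvMapGet (fun (a : Nat) => (pvFB items (a : Int)).1) K (j - p) (by omega) (by omega)]
      simp only [Option.getD_some]
      rw [Int.toNat_of_nonneg (by omega : (0 : Int) ≤ j - p)]
      by_cases hlt : st.1 < v + (pvFB items (j - p)).1
      · rw [if_pos hlt, if_pos hlt]
        exact ihl hsub' (v + (pvFB items (j - p)).1, p :: (pvFB items (j - p)).2)
      · rw [if_neg hlt, if_neg hlt]
        exact ihl hsub' st
    · rw [if_neg hp, if_neg hp]
      exact ihl hsub' st

-- the two tables hold A's best value and the head of A's best bag at every index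
theorem pvB_build_eq (items : List (Int × Int)) (hpos : pvPos items) :
    ∀ K : Nat, pvB_build items K =
      ((List.range (K + 1)).map (fun (j : Nat) => (pvFB items (j : Int)).1),
       (List.range (K + 1)).map (fun (j : Nat) => (pvFB items (j : Int)).2.headI)) := by
  intro K
  induction K with
  | zero =>
    simp [pvB_build, List.range_one, pvFB_nonpos items 0 (le_refl 0)]
  | succ K ihK =>
    have hrow : pvB_row items ((List.range (K + 1)).map (fun (j : Nat) => (pvFB items (j : Int)).1)) ((K : Int) + 1)
        = ((pvFB items ((K : Int) + 1)).1, (pvFB items ((K : Int) + 1)).2.headI) := by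
      unfold pvB_row
      have h := pvScan2 items hpos K ((K : Int) + 1) (by omega) items
        (fun _ h => h) (0, [])
      have hinit : (((0 : Int), ([] : List Int)).1, ((0 : Int), ([] : List Int)).2.headI)
          = ((0 : Int), (0 : Int)) := rfl
      rw [hinit] at h
      rw [h, pvFB_eq_foldl items hpos _ (by omega)]
    simp only [pvB_build, ihK, hrow]
    rw [List.range_succ (n := K + 1), List.map_append, List.map_append]
    simp only [List.map_cons, List.map_nil]
    push_cast
    rfl

theorem pvB_vals_get (items : List (Int × Int)) (hpos : pvPos items) (K : Nat) (i : Int)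
    (h0 : 0 ≤ i) (hK : i ≤ (K : Int)) :
    PySem.List.pyGet? (pvB_build items K).1 i = some ((pvFB items i).1) := by
  rw [pvB_build_eq items hpos K]
  rw [pvMapGet _ K i h0 hK, Int.toNat_of_nonneg h0]

theorem pvB_chs_get (items : List (Int × Int)) (hpos : pvPos items) (K : Nat) (i : Int)
    (h0 : 0 ≤ i) (hK : i ≤ (K : Int)) :
    PySem.List.pyGet? (pvB_build items K).2 i = some ((pvFB items i).2.headI) := by
  rw [pvB_build_eq items hpos K]
  rw [pvMapGet _ K i h0 hK, Int.toNat_of_nonneg h0]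

-- A's bag is empty or starts with a positive cut c followed by the bag of j - c
theorem pvFB_bag_struct (items : List (Int × Int)) (hpos : pvPos items) (j : Int) :
    (pvFB items j).2 = [] ∨
      ∃ c, 0 < c ∧ c ≤ j ∧ (pvFB items j).2 = c :: (pvFB items (j - c)).2 := by
  by_cases hj : j ≤ 0
  · left; rw [pvFB_nonpos items j hj]
  · rw [pvFB_eq_foldl items hpos j (by omega)]
    have : ∀ l : List (Int × Int), (∀ kv ∈ l, kv ∈ items) → ∀ st : Int × List Int,
        (st.2 = [] ∨ ∃ c, 0 < c ∧ c ≤ j ∧ st.2 = c :: (pvFB items (j - c)).2) →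
        ((l.foldl (pvStep items j) st).2 = [] ∨
          ∃ c, 0 < c ∧ c ≤ j ∧ (l.foldl (pvStep items j) st).2 = c :: (pvFB items (j - c)).2) := by
      intro l
      induction l with
      | nil => intro _ st h; simpa using h
      | cons hd tl ihl =>
        intro hsub st h
        obtain ⟨p, v⟩ := hd
        have hp0 : (0 : Int) < p := hpos _ (hsub _ List.mem_cons_self)
        have hsub' : ∀ kv ∈ tl, kv ∈ items := fun kv hk => hsub _ (List.mem_cons_of_mem _ hk)
        simp only [List.foldl_cons, pvStep]
        by_cases hp : p ≤ j
        · rw [if_pos hp]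
          by_cases hlt : st.1 < v + (pvFB items (j - p)).1
          · rw [if_pos hlt]
            exact ihl hsub' _ (Or.inr ⟨p, hp0, hp, rfl⟩)
          · rw [if_neg hlt]; exact ihl hsub' _ h
        · rw [if_neg hp]; exact ihl hsub' _ h
    exact this items (fun _ h => h) (0, []) (Or.inl rfl)

-- bag_of reconstructs A's bag from the recorded cuts
theorem pvB_bagof_eq (items : List (Int × Int)) (hpos : pvPos items) (K : Nat) :
    ∀ N : Nat, ∀ fuel j, j.toNat = N → 0 ≤ j → j ≤ (K : Int) → N ≤ fuel → ∀ out,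
      pvB_bagof (pvB_build items K).2 fuel j out = out ++ (pvFB items j).2 := by
  intro N
  induction N using Nat.strong_induction_on with
  | _ N IH =>
    intro fuel j hN h0 hK hf out
    cases fuel with
    | zero =>
      have hj0 : j = 0 := by omega
      subst hj0
      simp [pvB_bagof, pvFB_nonpos items 0 (le_refl 0)]
    | succ fuel =>
      simp only [pvB_bagof]
      rw [pvB_chs_get items hpos K j h0 hK]
      simp only [Option.getD_some]
      rcases pvFB_bag_struct items hpos j with hb | ⟨c, hc0, hcj, hb⟩
      · rw [if_neg (by simp [hb])]
        rw [hb, List.append_nil]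
      · have hj0 : 0 < j := by omega
        rw [if_pos ⟨hj0, by simp [hb]; omega⟩]
        have hhd : (pvFB items j).2.headI = c := by simp [hb]
        rw [hhd]
        rw [IH (j - c).toNat (by omega) fuel (j - c) rfl (by omega) (by omega) (by omega)]
        rw [hb]
        simp

-- the two m-loops stay in lockstep: equal best values, and A's bag is what B will
-- reconstruct from its recorded best i (empty, with best value 0, when no i improved)
theorem pv_mloop_eq (items : List (Int × Int)) (hpos : pvPos items) (v10 n : Int)
    (K : Nat) (hnK : n ≤ (K : Int)) :
    ∀ L : List Int, (∀ i ∈ L, 0 ≤ i) → ∀ (stA : Int × List Int) (stB : Int × Option Int),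
      stA.1 = stB.1 →
      ((stB.2 = none ∧ stA.1 = 0 ∧ stA.2 = []) ∨
        (∃ i, stB.2 = some i ∧ 0 ≤ i ∧ 0 ≤ n - 10 * i ∧
          stA.2 = (pvFB items (n - 10 * i)).2 ++ List.replicate i.toNat 10)) →
      (pvA_mloop items v10 n L stA).1 = (pvB_mloop (pvB_build items K).1 v10 n L stB).1 ∧
      (((pvB_mloop (pvB_build items K).1 v10 n L stB).2 = none ∧
          (pvA_mloop items v10 n L stA).1 = 0 ∧ (pvA_mloop items v10 n L stA).2 = []) ∨
        (∃ i, (pvB_mloop (pvB_build items K).1 v10 n L stB).2 = some i ∧ 0 ≤ i ∧ 0 ≤ n - 10 * i ∧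
          (pvA_mloop items v10 n L stA).2 =
            (pvFB items (n - 10 * i)).2 ++ List.replicate i.toNat 10)) := by
  intro L
  induction L with
  | nil =>
    intro _ stA stB h1 h2
    simpa only [pvA_mloop, pvB_mloop] using ⟨h1, h2⟩
  | cons i rest ihL =>
    intro hL stA stB h1 h2
    obtain ⟨best, bag⟩ := stA
    obtain ⟨best2, besti⟩ := stB
    simp only at h1
    subst h1
    have hi : (0 : Int) ≤ i := hL _ List.mem_cons_self
    have hL' : ∀ j ∈ rest, (0 : Int) ≤ j := fun j hj => hL _ (List.mem_cons_of_mem _ hj)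
    simp only [pvA_mloop, pvB_mloop]
    have hms : n - i * 10 = n - 10 * i := by ring
    by_cases hbrk : n - i * 10 < 0
    · rw [if_pos hbrk, if_pos (by omega : n - 10 * i < 0)]
      exact ⟨rfl, h2⟩
    · rw [if_neg hbrk, if_neg (by omega : ¬ n - 10 * i < 0)]
      rw [pvB_vals_get items hpos K (n - 10 * i) (by omega) (by omega)]
      simp only [Option.getD_some]
      rw [pvA_mm_correct items hpos, hms]
      by_cases hgt : (pvFB items (n - 10 * i)).1 + v10 * i > best
      · rw [if_pos hgt, if_pos hgt]
        exact ihL hL' _ _ rfl (Or.inr ⟨i, rfl, hi, by omega, rfl⟩)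
      · rw [if_neg hgt, if_neg hgt]
        exact ihL hL' _ _ rfl h2

theorem pvA_mm_nonpos (items : List (Int × Int)) (n : Int) (hn : n ≤ 0) :
    pvA_mm n items = (0, []) := by
  simp [pvA_mm, pvA_xx, hn]

theorem cut_rod_limit_10m_spec : Claim_equal_cut_rod_limit_10m := by
  intro m n prices _dom pre
  unfold Spec_cut_rod_limit_10m
  unfold Pre_cut_rod_limit_10m at pre
  simp only [cut_rod_limit_10m, cut_rod_limit_10m_alt]
  by_cases hc : (PySem.Dict.ofList prices).contains 10 = true
  · simp only [hc, if_true] at pre ⊢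
    obtain ⟨hm, hn, hposd, -⟩ := pre
    have hpos : pvPos ((PySem.Dict.ofList prices).erase 10).items := by
      intro kv hkv
      simp only [PySem.Dict.erase, List.mem_filter] at hkv
      exact hposd _ hkv.1
    set items := ((PySem.Dict.ofList prices).erase 10).items with hitems
    set K := (if 0 < n then n.toNat else 0) with hKdef
    have hnK : n ≤ (K : Int) := by
      rw [hKdef]; split <;> omega
    have h := pv_mloop_eq items hpos ((PySem.Dict.ofList prices).getD 10 0) n K hnK
      (PySem.List.pyRange 0 (m + 1) 1) (fun i hi => ((PySem.List.mem_pyRange_one).1 hi).1)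
      (0, []) (0, none) rfl (Or.inl ⟨rfl, rfl, rfl⟩)
    rcases h.2 with ⟨hnone, hv0, hbag⟩ | ⟨i, hsome, hi0, hni, hbag⟩
    · rw [hnone]
      exact Prod.ext hv0 hbag
    · rw [hsome]
      refine Prod.ext h.1 ?_
      show _ = pvB_bagof _ _ _ _ ++ _
      rw [hbag,
        pvB_bagof_eq items hpos K (n - 10 * i).toNat _ (n - 10 * i) rfl hni (by omega)
          (le_refl _) [], List.nil_append]
  · simp only [Bool.not_eq_true] at hc
    simp only [hc, Bool.false_eq_true, if_false] at pre ⊢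
    by_cases hneg : n < 0
    · rw [if_neg (show ¬ (0 : Int) ≤ n by omega)]
      exact pvA_mm_nonpos _ n (by omega)
    · rw [if_pos (show (0 : Int) ≤ n by omega)]
      by_cases hn0 : n = 0
      · subst hn0
        rw [pvA_mm_nonpos _ 0 (le_refl 0)]
        norm_num [pvB_build, pvB_bagof, PySem.List.pyGet?_zero_cons]
      · have hpos : pvPos (PySem.Dict.ofList prices).items := by
          rcases pre with h | h
          · omega
          · exact h
        have hK : n ≤ ((if 0 < n then n.toNat else 0 : Nat) : Int) := by split <;> omega
        rw [pvA_mm_correct _ hpos,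
          pvB_vals_get _ hpos _ n (by omega) hK,
          pvB_bagof_eq _ hpos _ n.toNat _ n rfl (by omega) hK (le_refl _) []]
        simp
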